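-- pv_equiv track=rewrite | github.com/aabishkaryal/dot | .agents/skills/use-railway/scripts/analyze-mysql.py | _split_mysql_resultsets_multi
-- ===== SOURCE A (Python) =====
-- from typing import Any, Dict, List, Optional, Tuple
--
-- def _split_mysql_resultsets_multi(output: str, header_keys: List[str]) -> List[str]:
--     """Split concatenated MySQL batch output into sections by multiple different header keys."""
--     lines = output.strip().split("\n")
--     sections: List[List[str]] = []
--     current: List[str] = []
--     expected_idx = 0
--
--     for line in lines:
--         # Check if this line starts a new result set
--         matched = False
--         if expected_idx < len(header_keys):
--             key = header_keys[expected_idx]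
--             if line.startswith(key + "\t") or line.strip() == key:
--                 if current:
--                     sections.append("\n".join(current))
--                 current = [line]
--                 expected_idx += 1
--                 matched = True
--         # Also check remaining headers in case we skipped one
--         if not matched:
--             for idx in range(expected_idx, len(header_keys)):
--                 key = header_keys[idx]
--                 if line.startswith(key + "\t") or line.strip() == key:
--                     if current:
--                         sections.append("\n".join(current))
--                     current = [line]
--                     expected_idx = idx + 1
--                     matched = True
--                     break
--         if not matched:
--             current.append(line)
--
--     if current:
--         sections.append("\n".join(current))
--
--     return sections
-- ===== SOURCE B (Python) =====
-- from typing import List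
--
--
-- def _split_mysql_resultsets_multi(output: str, header_keys: List[str]) -> List[str]:
--     """Two-pass variant: record section-boundary line indices first, then slice."""
--     lines = output.strip().split("\n")
--     n = len(header_keys)
--     boundaries: List[int] = []
--     ptr = 0
--     for i, line in enumerate(lines):
--         for j in range(ptr, n):
--             key = header_keys[j]
--             if line.startswith(key + "\t") or line.strip() == key:
--                 boundaries.append(i)
--                 ptr = j + 1
--                 break
--     sections: List[str] = []
--     prev = 0
--     for b in boundaries:
--         if b > prev:
--             sections.append("\n".join(lines[prev:b]))
--         prev = b
--     sections.append("\n".join(lines[prev:]))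
--     return sections
-- ===== Notes on version B (the rewrite author's own statement) =====
-- stated objective: alternative
-- what changed: Replaces A's single-pass accumulator (sections/current lists mutated per line) with a two-pass decomposition: first record boundary line indices with a moving header pointer, then turn boundaries into slices of the line list, skipping only an empty leading slice.
import Mathlib
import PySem

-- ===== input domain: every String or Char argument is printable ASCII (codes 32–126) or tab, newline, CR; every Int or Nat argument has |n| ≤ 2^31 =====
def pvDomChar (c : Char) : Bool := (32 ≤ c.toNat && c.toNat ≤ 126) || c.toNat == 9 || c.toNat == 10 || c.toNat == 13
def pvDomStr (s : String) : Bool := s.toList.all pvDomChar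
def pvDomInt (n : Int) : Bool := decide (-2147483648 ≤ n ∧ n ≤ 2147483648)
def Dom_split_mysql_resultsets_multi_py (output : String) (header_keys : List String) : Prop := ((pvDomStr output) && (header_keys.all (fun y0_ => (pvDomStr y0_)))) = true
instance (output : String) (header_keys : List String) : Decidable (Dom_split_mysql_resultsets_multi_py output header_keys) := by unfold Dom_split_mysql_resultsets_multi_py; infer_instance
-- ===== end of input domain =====

-- B replaces A's one-pass accumulator with a two-pass decomposition (record boundary
-- indices, then slice); same return value, objective: alternative decomposition.

-- ===== PORT A =====
-- line.startswith(key + "\t") or line.strip() == key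
def pvAMatch (key line : List Char) : Bool :=
  PySem.Chars.startswith line (key ++ ['\t']) || PySem.Chars.strip line == key

-- A's inner loop 'for idx in range(expected_idx, len(header_keys)): … break'
def pvAFind (keys : List (List Char)) (line : List Char) (idx : Nat) : Option Nat :=
  if h : idx < keys.length then
    (if pvAMatch keys[idx] line then some idx else pvAFind keys line (idx + 1))
  else none
termination_by keys.length - idx

-- A's main loop: state (sections, current, expected_idx); the trailing
-- 'if current: sections.append(…)' is the base case.
def pvALoop (keys : List (List Char)) (lines : List (List Char))
    (sections current : List (List Char)) (eidx : Nat) : List (List Char) :=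
  match lines with
  | [] => if current.isEmpty then sections else sections ++ [PySem.Chars.join ['\n'] current]
  | line :: rest =>
    -- first check: header_keys[expected_idx] alone
    let first : Option Nat :=
      if h : eidx < keys.length then
        (if pvAMatch keys[eidx] line then some eidx else none)
      else none
    -- 'if not matched:' scan of the remaining headers
    let m : Option Nat :=
      match first with
      | some j => some j
      | none => pvAFind keys line eidx
    match m with
    | some j =>
        pvALoop keys rest
          (if current.isEmpty then sections else sections ++ [PySem.Chars.join ['\n'] current])
          [line] (j + 1)
    | none => pvALoop keys rest sections (current ++ [line]) eidx

def split_mysql_resultsets_multi_py (output : String) (header_keys : List String) : List String :=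
  let lines := PySem.Chars.splitOn (PySem.Chars.strip output.toList) ['\n']
  (pvALoop (header_keys.map String.toList) lines [] [] 0).map String.ofList

-- ===== PORT B =====
def pvBMatch (key line : List Char) : Bool :=
  PySem.Chars.startswith line (key ++ ['\t']) || PySem.Chars.strip line == key

-- B's inner loop 'for j in range(ptr, n): … break'
def pvBFind (keys : List (List Char)) (line : List Char) (j : Nat) : Option Nat :=
  if h : j < keys.length then
    (if pvBMatch keys[j] line then some j else pvBFind keys line (j + 1))
  else none
termination_by keys.length - j

-- B's first pass: boundary line indices (i = current index, ptr = header pointer)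
def pvBBounds (keys : List (List Char)) (lines : List (List Char)) (i ptr : Nat) : List Nat :=
  match lines with
  | [] => []
  | line :: rest =>
    match pvBFind keys line ptr with
    | some j => i :: pvBBounds keys rest (i + 1) (j + 1)
    | none => pvBBounds keys rest (i + 1) ptr

-- B's second pass: turn boundaries into slices 'lines[prev:b]' / 'lines[prev:]'
def pvBSections (lines : List (List Char)) (bs : List Nat) (prev : Nat) : List (List Char) :=
  match bs with
  | [] => [PySem.Chars.join ['\n'] (PySem.List.slice lines (some (prev : Int)) none)]
  | b :: rest =>
      (if prev < b then
        [PySem.Chars.join ['\n'] (PySem.List.slice lines (some (prev : Int)) (some (b : Int)))]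
      else []) ++ pvBSections lines rest b

def split_mysql_resultsets_multi_py_alt (output : String) (header_keys : List String) : List String :=
  let lines := PySem.Chars.splitOn (PySem.Chars.strip output.toList) ['\n']
  (pvBSections lines (pvBBounds (header_keys.map String.toList) lines 0 0) 0).map String.ofList

-- ===== PRECONDITION & SPEC =====
def Spec_split_mysql_resultsets_multi_py (output : String) (header_keys : List String) (out : List String) : Prop := out = split_mysql_resultsets_multi_py_alt output header_keys
instance (output : String) (header_keys : List String) (out : List String) : Decidable (Spec_split_mysql_resultsets_multi_py output header_keys out) := by unfold Spec_split_mysql_resultsets_multi_py; infer_instance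

-- ===== CLAIM (what is proved, stated in full; the proofs are below) =====
def Claim_equal_split_mysql_resultsets_multi_py : Prop := ∀ (output : String) (header_keys : List String), Dom_split_mysql_resultsets_multi_py output header_keys → Spec_split_mysql_resultsets_multi_py output header_keys (split_mysql_resultsets_multi_py output header_keys)

-- ===== LEMMAS AND PROOFS =====

theorem pvBMatch_eq : pvBMatch = pvAMatch := rfl

theorem pvBFind_eq (keys : List (List Char)) (line : List Char) (idx : Nat) :
    pvBFind keys line idx = pvAFind keys line idx := by
  fun_induction pvBFind keys line idx with
  | case1 j h hm => rw [pvAFind]; simp [h, pvBMatch_eq ▸ hm]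
  | case2 j h hm ih => rw [pvAFind]; simp [h, pvBMatch_eq ▸ hm, ih]
  | case3 j h => rw [pvAFind]; simp [h]

-- reference recursion: sections of `lines` given header pointer `ptr` and pending chunk `acc`
def pvRef (keys : List (List Char)) (lines : List (List Char)) (ptr : Nat)
    (acc : List (List Char)) : List (List Char) :=
  match lines with
  | [] => if acc.isEmpty then [] else [PySem.Chars.join ['\n'] acc]
  | line :: rest =>
    match pvAFind keys line ptr with
    | some j =>
        (if acc.isEmpty then [] else [PySem.Chars.join ['\n'] acc]) ++ pvRef keys rest (j + 1) [line]
    | none => pvRef keys rest ptr (acc ++ [line])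

-- A's combined "first check, then scan" equals one scan from eidx
theorem pvAFind_first (keys : List (List Char)) (line : List Char) (eidx : Nat)
    (h : eidx < keys.length) (hm : pvAMatch keys[eidx] line = true) :
    pvAFind keys line eidx = some eidx := by
  rw [pvAFind]; simp [h, hm]

theorem pvALoop_eq_ref (keys : List (List Char)) (lines : List (List Char)) :
    ∀ (sections current : List (List Char)) (eidx : Nat),
      pvALoop keys lines sections current eidx = sections ++ pvRef keys lines eidx current := by
  induction lines with
  | nil => intro sections current eidx; simp only [pvALoop, pvRef]; split <;> simp
  | cons line rest ih =>
    intro sections current eidx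
    rw [pvALoop, pvRef]
    by_cases h : eidx < keys.length
    · by_cases hm : pvAMatch keys[eidx] line = true
      · simp only [dif_pos h, if_pos hm, pvAFind_first keys line eidx h hm, ih]
        split <;> simp
      · cases hf : pvAFind keys line eidx with
        | some j => simp only [dif_pos h, if_neg hm, ih]; split <;> simp
        | none => simp only [dif_pos h, if_neg hm, ih]
    · cases hf : pvAFind keys line eidx with
      | some j => simp only [dif_neg h, ih]; split <;> simp
      | none => simp only [dif_neg h, ih]

-- B's boundary indices only shift with the start index
theorem pvBBounds_shift (keys : List (List Char)) (lines : List (List Char)) :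
    ∀ (i ptr : Nat), pvBBounds keys lines i ptr = (pvBBounds keys lines 0 ptr).map (· + i) := by
  induction lines with
  | nil => intro i ptr; simp [pvBBounds]
  | cons line rest ih =>
    intro i ptr
    rw [pvBBounds]
    conv_rhs => rw [pvBBounds]
    cases hf : pvBFind keys line ptr with
    | some j =>
        simp only [ih (i + 1), ih 1, List.map_cons, List.map_map, Nat.zero_add]
        congr 1
        · congr 1; funext x; simp; omega
    | none =>
        simp only [ih (i + 1), ih 1, List.map_map]
        congr 1; funext x; simp; omega

-- slicing a list with all cut points past a prefix ignores the prefix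
theorem pvBSections_prefix (pre rest : List (List Char)) :
    ∀ (bs : List Nat) (prev : Nat),
      pvBSections (pre ++ rest) (bs.map (· + pre.length)) (pre.length + prev) =
        pvBSections rest bs prev := by
  intro bs
  induction bs with
  | nil =>
      intro prev
      simp only [pvBSections, List.map_nil, PySem.List.slice_from_natCast,
        List.drop_length_add_append]
  | cons b bs ih =>
      intro prev
      simp only [pvBSections, List.map_cons]
      rw [PySem.List.slice_natCast, PySem.List.slice_natCast, List.drop_length_add_append]
      have h3 : b + pre.length = pre.length + b := by omega
      have h2 : (pre.length + prev < pre.length + b) = (prev < b) := by simp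
      have h1 : pre.length + b - (pre.length + prev) = b - prev := by omega
      simp only [h3, h2, h1]
      rw [ih b]

-- main B lemma: with a nonempty pending chunk `acc` in front, the two passes compute pvRef
theorem pvBSections_eq_ref (keys : List (List Char)) (lines : List (List Char)) :
    ∀ (ptr : Nat) (acc : List (List Char)), acc ≠ [] →
      pvBSections (acc ++ lines) ((pvBBounds keys lines 0 ptr).map (· + acc.length)) 0 =
        pvRef keys lines ptr acc := by
  induction lines with
  | nil =>
      intro ptr acc hacc
      simp only [pvBBounds, List.map_nil, pvBSections, pvRef, List.append_nil]
      rw [PySem.List.slice_from_natCast]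
      simp [hacc]
  | cons line rest ih =>
      intro ptr acc hacc
      rw [pvBBounds, pvRef, pvBFind_eq]
      cases hf : pvAFind keys line ptr with
      | some j =>
          simp only [List.map_cons, Nat.zero_add]
          have hlen : 0 < acc.length := List.length_pos_of_ne_nil hacc
          rw [pvBSections, if_pos hlen, PySem.List.slice_natCast]
          simp only [List.drop_zero, Nat.sub_zero, List.take_left]
          rw [pvBBounds_shift keys rest 1 (j + 1), List.map_map]
          have hpre := pvBSections_prefix (pre := acc) (rest := line :: rest)
            ((pvBBounds keys rest 0 (j + 1)).map (· + 1)) 0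
          simp only [Nat.add_zero, List.map_map] at hpre
          rw [hpre]
          have hi := ih (j + 1) [line] (by simp)
          simp only [List.singleton_append, List.length_cons, List.length_nil,
            Nat.zero_add] at hi
          rw [hi]
          simp [hacc]
      | none =>
          simp only []
          have hmap : (pvBBounds keys rest 0 ptr).map ((· + acc.length) ∘ (· + 1)) =
              (pvBBounds keys rest 0 ptr).map (· + (acc ++ [line]).length) := by
            congr 1; funext x
            simp only [Function.comp_apply, List.length_append, List.length_cons,
              List.length_nil]
            omega
          rw [pvBBounds_shift keys rest 1 ptr, List.map_map, hmap]
          have hassoc : acc ++ line :: rest = (acc ++ [line]) ++ rest := by simp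
          rw [hassoc, ih ptr (acc ++ [line]) (by simp)]

theorem pvB_top (keys : List (List Char)) (line : List Char) (rest : List (List Char)) :
    pvBSections (line :: rest) (pvBBounds keys (line :: rest) 0 0) 0 =
      pvRef keys (line :: rest) 0 [] := by
  rw [pvBBounds, pvRef, pvBFind_eq]
  cases hf : pvAFind keys line 0 with
  | some j =>
      rw [pvBSections]
      simp only [lt_self_iff_false, if_false, List.nil_append, List.isEmpty_nil]
      rw [pvBBounds_shift keys rest 1 (j + 1)]
      have := pvBSections_eq_ref keys rest (j + 1) [line] (by simp)
      simpa using this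
  | none =>
      rw [pvBBounds_shift keys rest 1 0]
      have := pvBSections_eq_ref keys rest 0 [line] (by simp)
      simpa using this

-- output.strip().split("\n") is never the empty list
theorem pvSplitOn_go_ne_nil (sep : List Char) :
    ∀ (fuel : Nat) (l cur : List Char) (acc : List (List Char)),
      PySem.Chars.splitOn.go sep fuel l cur acc ≠ [] := by
  intro fuel
  induction fuel with
  | zero => intro l cur acc; rw [PySem.Chars.splitOn.go]; simp
  | succ fuel ih =>
      intro l cur acc
      cases l with
      | nil => rw [PySem.Chars.splitOn.go] <;> all_goals simp
      | cons c cs =>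
          rw [PySem.Chars.splitOn.go]
          split
          · exact ih _ _ _
          · exact ih _ _ _

theorem pvSplitOn_ne_nil (s sep : List Char) : PySem.Chars.splitOn s sep ≠ [] := by
  rw [PySem.Chars.splitOn]; exact pvSplitOn_go_ne_nil sep _ s [] []

-- ===== VERDICT (by name: the statement is the Claim_ definition above) =====
theorem split_mysql_resultsets_multi_py_spec : Claim_equal_split_mysql_resultsets_multi_py := by
  intro output header_keys _
  unfold Spec_split_mysql_resultsets_multi_py
  unfold split_mysql_resultsets_multi_py split_mysql_resultsets_multi_py_alt
  cases hl : PySem.Chars.splitOn (PySem.Chars.strip output.toList) ['\n'] with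
  | nil => exact absurd hl (pvSplitOn_ne_nil _ _)
  | cons line rest =>
      dsimp only
      rw [pvALoop_eq_ref, pvB_top]
      simp
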